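-- pv_equiv track=rewrite | github.com/OpenHistoricalMap/ohm-deploy | images/tiler-cache-martin/scripts/purge_cache.py | get_parent_tiles
-- ===== SOURCE A (Python) =====
-- def get_parent_tiles(z, x, y):
--     """Get all parent tiles from z down to z0."""
--     parents = []
--     while z > 0:
--         z -= 1
--         x //= 2
--         y //= 2
--         parents.append((z, x, y))
--     return parents
-- ===== SOURCE B (Python) =====
-- def get_parent_tiles(z, x, y):
--     """Get all parent tiles from z down to z0."""
--     if z <= 0:
--         return []
--     tiles = [(0, x >> z, y >> z)]          # root tile first
--     for level in range(1, z):
--         s = z - level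
--         _, px, py = tiles[-1]
--         # child of the previous ancestor: double and append the next bit
--         tiles.append((level, 2 * px + ((x >> s) & 1), 2 * py + ((y >> s) & 1)))
--     tiles.reverse()
--     return tiles
-- ===== Notes on version B (the rewrite author's own statement) =====
-- stated objective: alternative
-- what changed: Instead of A's bottom-up loop that repeatedly halves x and y, B works top-down: it computes the zoom-0 root tile with one shift by z, then reconstructs each child ancestor from its parent by doubling and adding the next bit of x and y, and finally reverses the root-first list.
import Mathlib
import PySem

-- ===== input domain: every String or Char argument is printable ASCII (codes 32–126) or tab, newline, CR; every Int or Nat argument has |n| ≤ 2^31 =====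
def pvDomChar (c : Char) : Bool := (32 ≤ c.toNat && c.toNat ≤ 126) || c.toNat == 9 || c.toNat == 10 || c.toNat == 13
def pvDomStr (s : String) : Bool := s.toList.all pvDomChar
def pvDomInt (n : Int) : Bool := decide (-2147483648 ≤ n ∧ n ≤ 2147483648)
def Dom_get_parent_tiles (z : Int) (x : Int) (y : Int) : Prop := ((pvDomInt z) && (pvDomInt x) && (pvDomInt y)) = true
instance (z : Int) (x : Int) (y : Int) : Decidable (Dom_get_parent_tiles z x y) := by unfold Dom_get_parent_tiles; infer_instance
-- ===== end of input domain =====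

-- B replaces A's bottom-up halving loop by a top-down reconstruction: one shift gives
-- the zoom-0 root, each child is rebuilt from its parent by doubling plus the next bit
-- of x and y, and the root-first list is reversed; objective: alternative.

-- ===== PORT A =====
-- literal port of A's while-loop: state (z, x, y) is halved each iteration
def get_parent_tiles (z : Int) (x : Int) (y : Int) : List (Int × Int × Int) :=
  if _h : z > 0 then
    let z' := z - 1
    let x' := PySem.Int.floordiv x 2
    let y' := PySem.Int.floordiv y 2
    (z', x', y') :: get_parent_tiles z' x' y'
  else []
termination_by z.toNat
decreasing_by omega

-- ===== PORT B =====
-- literal port of Source B. Python's `tiles` grows by append and is read at tiles[-1];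
-- here the accumulator holds the SAME tiles newest-first (head = tiles[-1]), so
-- Python's final `tiles.reverse()` means the accumulator is returned as-is.
-- Python's `x >> k` on ints is Lean's arithmetic `x >>> k`; every shift count here
-- (z and z - level) is positive, where the two agree with Python exactly.
def get_parent_tiles_alt (z : Int) (x : Int) (y : Int) : List (Int × Int × Int) :=
  if z ≤ 0 then []
  else
    (PySem.List.pyRange 1 z 1).foldl
      (fun (tiles : List (Int × Int × Int)) (level : Int) =>
        match tiles with
        | [] => tiles  -- unreachable: the tile list starts nonempty
        | (_, px, py) :: _ =>
            (level, 2 * px + PySem.Int.band (x >>> (z - level)) 1,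
                    2 * py + PySem.Int.band (y >>> (z - level)) 1) :: tiles)
      [((0 : Int), x >>> z, y >>> z)]

-- ===== PRECONDITION & SPEC =====
def Spec_get_parent_tiles (z : Int) (x : Int) (y : Int) (out : List (Int × Int × Int)) : Prop := out = get_parent_tiles_alt z x y
instance (z : Int) (x : Int) (y : Int) (out : List (Int × Int × Int)) : Decidable (Spec_get_parent_tiles z x y out) := by unfold Spec_get_parent_tiles; infer_instance

-- ===== CLAIM (what is proved, stated in full; the proofs are below) =====
def Claim_equal_get_parent_tiles : Prop := ∀ (z : Int) (x : Int) (y : Int), Dom_get_parent_tiles z x y → Spec_get_parent_tiles z x y (get_parent_tiles z x y)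

-- ===== LEMMAS AND PROOFS =====

-- one arithmetic right shift is floor division by 2
theorem shiftRight_one_fdiv (x : Int) : x >>> (1 : Int) = Int.fdiv x 2 := by
  rw [show (1 : Int) = ((1 : Nat) : Int) from rfl]
  cases x with
  | ofNat m =>
      rw [Int.ofNat_eq_natCast, Int.shiftRight_natCast, Nat.shiftRight_eq_div_pow]
      exact_mod_cast Int.ofNat_fdiv m 2
  | negSucc m =>
      rw [Int.shiftRight_negSucc]
      simp [Nat.shiftRight_eq_div_pow, Int.fdiv]

-- n arithmetic right shifts are floor division by 2^n
theorem shiftRight_fdiv (n : Nat) (x : Int) : x >>> ((n : Nat) : Int) = Int.fdiv x (2 ^ n) := by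
  induction n generalizing x with
  | zero =>
      rw [show (((0 : Nat) : Int)) = (0 : Int) from rfl]
      rw [show ((0 : Int)) = (((0 : Nat) : Int)) from rfl, Int.shiftRight_natCast_right]
      rw [Int.shiftRight_zero]
      norm_num [Int.fdiv_one]
  | succ m ih =>
      rw [show (((m + 1 : Nat) : Int)) = ((m : Nat) : Int) + ((1 : Nat) : Int) by push_cast; ring]
      rw [Int.shiftRight_add']
      rw [ih, show (((1 : Nat) : Int)) = (1 : Int) from rfl, shiftRight_one_fdiv]
      rw [Int.fdiv_fdiv_eq_fdiv_mul x (by positivity) (by norm_num)]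
      norm_num [pow_succ]

-- composing two floor divisions multiplies the divisors
theorem fd_fd (x : Int) (s : Nat) :
    PySem.Int.floordiv (PySem.Int.floordiv x (2 ^ s)) 2 = PySem.Int.floordiv x (2 ^ (s + 1)) := by
  simp only [PySem.Int.floordiv]
  rw [Int.fdiv_fdiv_eq_fdiv_mul x (by positivity) (by norm_num), pow_succ]

-- child reconstruction: doubling the parent and adding the next bit gives the child
theorem step_bit (x : Int) (s : Nat) :
    2 * PySem.Int.floordiv x (2 ^ (s + 1)) + PySem.Int.band (x >>> ((s : Nat) : Int)) 1 =
      PySem.Int.floordiv x (2 ^ s) := by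
  rw [PySem.Int.band_one, shiftRight_fdiv]
  have h1 : (PySem.Int.floordiv x (2 ^ (s + 1))) = PySem.Int.floordiv (PySem.Int.floordiv x (2 ^ s)) 2 := (fd_fd x s).symm
  have h2 : Int.fdiv x (2 ^ s) = PySem.Int.floordiv x (2 ^ s) := rfl
  rw [h1, h2]
  have h := PySem.Int.floordiv_mul_add_mod (PySem.Int.floordiv x (2 ^ s)) 2
  omega

-- the tile B's algorithm holds at zoom j (as a function of the ORIGINAL x, y)
def pvTile (z x y : Int) (j : Nat) : Int × Int × Int :=
  ((j : Int), PySem.Int.floordiv x (2 ^ (z.toNat - j)), PySem.Int.floordiv y (2 ^ (z.toNat - j)))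

-- pvTile only depends on z through z.toNat
theorem pvTile_congr (z z' x y : Int) (h : z.toNat = z'.toNat) : pvTile z x y = pvTile z' x y := by
  funext j; simp [pvTile, h]

-- B's fold invariant: after levels 1..m the accumulator holds tiles m..0 newest-first
theorem alt_fold_invariant (z x y : Int) (m : Nat) (hm : m + 1 ≤ z.toNat) :
    (PySem.List.pyRange 1 ((m : Int) + 1) 1).foldl
        (fun (tiles : List (Int × Int × Int)) (level : Int) =>
          match tiles with
          | [] => tiles
          | (_, px, py) :: _ =>
              (level, 2 * px + PySem.Int.band (x >>> (z - level)) 1,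
                      2 * py + PySem.Int.band (y >>> (z - level)) 1) :: tiles)
        [((0 : Int), x >>> z, y >>> z)]
      = (List.range (m + 1)).reverse.map (pvTile z x y) := by
  induction m with
  | zero =>
      rw [show ((0 : Nat) : Int) + 1 = 1 from rfl, PySem.List.pyRange_one_eq_nil (by omega)]
      rw [show z = ((z.toNat : Nat) : Int) by omega, shiftRight_fdiv z.toNat x, shiftRight_fdiv z.toNat y]
      simp [pvTile, PySem.Int.floordiv]
      constructor <;> (congr 2; omega)
  | succ m ih =>
      have hm' : m + 1 ≤ z.toNat := by omega
      rw [show ((m + 1 : Nat) : Int) + 1 = ((m : Int) + 1) + 1 by push_cast; ring,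
        PySem.List.pyRange_one_succ_right (by omega), List.foldl_append, ih hm']
      obtain ⟨s, hs⟩ : ∃ s : Nat, z.toNat - m = s + 1 := ⟨z.toNat - m - 1, by omega⟩
      have hs' : z.toNat - (m + 1) = s := by omega
      have hrev : (List.range (m + 1)).reverse = m :: (List.range m).reverse := by
        rw [List.range_succ, List.reverse_append]; simp
      rw [hrev]
      simp only [List.foldl_cons, List.foldl_nil, List.map_cons, pvTile, hs]
      rw [show z - ((m : Int) + 1) = ((s : Nat) : Int) by omega]
      rw [step_bit x s, step_bit y s]
      have h2 : (List.range (m + 1 + 1)).reverse = (m + 1) :: (List.range (m + 1)).reverse := by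
        rw [List.range_succ, List.reverse_append]; simp
      rw [h2, hrev]
      simp only [List.map_cons, pvTile, hs', hs]
      norm_cast

-- closed form of B: tiles for zooms z-1 … 0, i.e. (range n).reverse mapped through pvTile
theorem alt_closed_form (z x y : Int) (hz : 0 < z) :
    get_parent_tiles_alt z x y = (List.range z.toNat).reverse.map (pvTile z x y) := by
  obtain ⟨m, hm⟩ : ∃ m : Nat, z.toNat = m + 1 := ⟨z.toNat - 1, by omega⟩
  unfold get_parent_tiles_alt
  rw [if_neg (by omega)]
  have hz' : z = ((m : Int) + 1) := by omega
  rw [pvTile_congr z ((m : Int) + 1) x y (by omega), hm, hz']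
  exact alt_fold_invariant ((m : Int) + 1) x y m (by omega)

-- A's loop in closed form: the k-th produced tile (0-based) is (z-(k+1), x // 2^(k+1), y // 2^(k+1))
theorem get_parent_tiles_eq_map (n : Nat) : ∀ (z x y : Int), z.toNat = n →
    get_parent_tiles z x y =
      (List.range n).map
        (fun (k : Nat) => (z - (1 + (k : Int)), PySem.Int.floordiv x (2 ^ (k + 1)),
                   PySem.Int.floordiv y (2 ^ (k + 1)))) := by
  induction n with
  | zero =>
    intro z x y hz
    rw [get_parent_tiles]
    simp
    omega
  | succ m ih =>
    intro z x y hz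
    rw [get_parent_tiles]
    rw [dif_pos (by omega)]
    simp only []
    show ((z-1, PySem.Int.floordiv x 2, PySem.Int.floordiv y 2) :: get_parent_tiles (z-1) (PySem.Int.floordiv x 2) (PySem.Int.floordiv y 2)) = _
    rw [ih (z - 1) (PySem.Int.floordiv x 2) (PySem.Int.floordiv y 2) (by omega)]
    rw [List.range_succ_eq_map, List.map_cons, List.map_map]
    refine congrArg₂ _ (by norm_num) ?_
    refine List.map_congr_left ?_
    intro k _
    simp only [Function.comp]
    refine congrArg₂ _ (by push_cast; ring) ?_
    have hx : PySem.Int.floordiv (PySem.Int.floordiv x 2) (2 ^ (k + 1)) =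
        PySem.Int.floordiv x (2 ^ (k + 1 + 1)) := by
      simp only [PySem.Int.floordiv]
      rw [Int.fdiv_fdiv_eq_fdiv_mul x (by norm_num) (by positivity)]
      norm_num [pow_succ, mul_comm]
    have hy : PySem.Int.floordiv (PySem.Int.floordiv y 2) (2 ^ (k + 1)) =
        PySem.Int.floordiv y (2 ^ (k + 1 + 1)) := by
      simp only [PySem.Int.floordiv]
      rw [Int.fdiv_fdiv_eq_fdiv_mul y (by norm_num) (by positivity)]
      norm_num [pow_succ, mul_comm]
    rw [hx, hy]

-- ===== VERDICT (by name: the statement is the Claim_ definition above) =====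
theorem get_parent_tiles_spec : Claim_equal_get_parent_tiles := by
  intro z x y _
  unfold Spec_get_parent_tiles
  by_cases hz : 0 < z
  · rw [get_parent_tiles_eq_map z.toNat z x y rfl, alt_closed_form z x y hz]
    refine List.ext_getElem (by simp) ?_
    intro k h1 h2
    simp only [List.getElem_map, List.getElem_reverse, List.length_range, List.getElem_range]
    have hk : k < z.toNat := by simpa using h1
    unfold pvTile
    refine congrArg₂ _ (by omega) ?_
    have he : z.toNat - (z.toNat - 1 - k) = k + 1 := by omega
    rw [he]
  · rw [get_parent_tiles]
    rw [dif_neg (by omega)]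
    unfold get_parent_tiles_alt
    rw [if_pos (by omega)]
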